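-- pv_equiv track=rewrite | github.com/ifnodoraemon/nano-rag | app/retrieval/context_builder.py | _order_contexts_by_evidence
-- ===== SOURCE A (Python) =====
-- DEFAULT_EVIDENCE_ORDER = ["primary", "supporting", "conflicting"]
--
-- def _order_contexts_by_evidence(contexts: list[dict[str, object]]) -> list[dict[str, object]]:
--     grouped: dict[str, list[dict[str, object]]] = {role: [] for role in DEFAULT_EVIDENCE_ORDER}
--     extras: list[dict[str, object]] = []
--     for context in contexts:
--         role = str(context.get("evidence_role") or "supporting")
--         if role in grouped:
--             grouped[role].append(context)
--         else:
--             extras.append(context)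
--     ordered: list[dict[str, object]] = []
--     for role in DEFAULT_EVIDENCE_ORDER:
--         ordered.extend(grouped[role])
--     ordered.extend(extras)
--     return ordered
-- ===== SOURCE B (Python) =====
-- DEFAULT_EVIDENCE_ORDER = ["primary", "supporting", "conflicting"]
--
-- def _order_contexts_by_evidence(contexts: list[dict[str, object]]) -> list[dict[str, object]]:
--     rank = {role: i for i, role in enumerate(DEFAULT_EVIDENCE_ORDER)}
--     default = len(DEFAULT_EVIDENCE_ORDER)
--     return sorted(
--         contexts,
--         key=lambda context: rank.get(str(context.get("evidence_role") or "supporting"), default),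
--     )
-- ===== Notes on version B (the rewrite author's own statement) =====
-- stated objective: simpler
-- what changed: Replaces A's bucket-dict-plus-extras grouping loop and concatenation with a single stable sort keyed by a precomputed role-rank map (unknown roles share the default rank).
import Mathlib
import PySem

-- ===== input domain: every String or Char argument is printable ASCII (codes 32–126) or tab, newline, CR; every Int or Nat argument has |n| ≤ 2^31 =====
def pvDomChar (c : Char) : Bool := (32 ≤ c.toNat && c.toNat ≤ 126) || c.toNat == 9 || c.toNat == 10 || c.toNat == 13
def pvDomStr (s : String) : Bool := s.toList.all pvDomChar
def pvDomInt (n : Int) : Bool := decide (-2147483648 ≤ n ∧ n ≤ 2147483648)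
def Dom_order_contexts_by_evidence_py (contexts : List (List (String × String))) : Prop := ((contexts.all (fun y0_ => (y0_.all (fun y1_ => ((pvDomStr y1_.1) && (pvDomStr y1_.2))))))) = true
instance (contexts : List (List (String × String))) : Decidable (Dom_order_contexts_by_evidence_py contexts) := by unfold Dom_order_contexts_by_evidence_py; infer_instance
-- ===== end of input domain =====

-- B replaces A's bucket-dict-plus-extras grouping loop by one stable sort with a precomputed role-rank key; objective: simpler.

-- ===== PORT A =====
def DEFAULT_EVIDENCE_ORDER : List String := ["primary", "supporting", "conflicting"]

-- role = str(context.get("evidence_role") or "supporting")  (the same expression occurs in both Pythons)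
def pvRole (context : List (String × String)) : String :=
  match (PySem.Dict.mk context).get? "evidence_role" with
  | none => "supporting"
  | some s => if s = "" then "supporting" else s

def order_contexts_by_evidence_py (contexts : List (List (String × String))) : List (List (String × String)) :=
  let grouped : PySem.Dict String (List (List (String × String))) :=
    DEFAULT_EVIDENCE_ORDER.foldl (fun d role => d.insert role []) PySem.Dict.empty
  let st :=
    contexts.foldl
      (fun (st : PySem.Dict String (List (List (String × String))) × List (List (String × String))) context =>
        if st.1.contains (pvRole context) then
          (st.1.modify (pvRole context) [] (fun l => l ++ [context]), st.2)
        else (st.1, st.2 ++ [context]))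
      (grouped, [])
  let ordered := DEFAULT_EVIDENCE_ORDER.foldl (fun acc role => acc ++ st.1.getD role []) []
  ordered ++ st.2

-- ===== PORT B =====
def order_contexts_by_evidence_py_alt (contexts : List (List (String × String))) : List (List (String × String)) :=
  let rank : PySem.Dict String Int :=
    (PySem.List.enumerate DEFAULT_EVIDENCE_ORDER 0).foldl (fun d p => d.insert p.2 (p.1 : Int)) PySem.Dict.empty
  let dflt : Int := DEFAULT_EVIDENCE_ORDER.length
  PySem.List.sorted contexts (fun context => rank.getD (pvRole context) dflt) false

-- ===== PRECONDITION & SPEC =====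
def Spec_order_contexts_by_evidence_py (contexts : List (List (String × String))) (out : List (List (String × String))) : Prop := out = order_contexts_by_evidence_py_alt contexts
instance (contexts : List (List (String × String))) (out : List (List (String × String))) : Decidable (Spec_order_contexts_by_evidence_py contexts out) := by unfold Spec_order_contexts_by_evidence_py; infer_instance

-- ===== CLAIM (what is proved, stated in full; the proofs are below) =====
def Claim_equal_order_contexts_by_evidence_py : Prop := ∀ (contexts : List (List (String × String))), Dom_order_contexts_by_evidence_py contexts → Spec_order_contexts_by_evidence_py contexts (order_contexts_by_evidence_py contexts)

-- ===== LEMMAS AND PROOFS =====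

-- the rank key both programs are driven by, as a plain if-chain
def pvRank (c : List (String × String)) : Int :=
  if pvRole c = "primary" then 0
  else if pvRole c = "supporting" then 1
  else if pvRole c = "conflicting" then 2
  else 3

theorem pvRank_cases (c : List (String × String)) :
    pvRank c = 0 ∨ pvRank c = 1 ∨ pvRank c = 2 ∨ pvRank c = 3 := by
  unfold pvRank; split_ifs <;> simp

theorem rank0_iff (c : List (String × String)) : pvRank c = 0 ↔ pvRole c = "primary" := by
  unfold pvRank; split_ifs <;> simp_all

theorem rank1_iff (c : List (String × String)) : pvRank c = 1 ↔ pvRole c = "supporting" := by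
  unfold pvRank; split_ifs <;> simp_all

theorem rank2_iff (c : List (String × String)) : pvRank c = 2 ↔ pvRole c = "conflicting" := by
  unfold pvRank; split_ifs <;> simp_all

theorem rank3_iff (c : List (String × String)) :
    pvRank c = 3 ↔ pvRole c ∉ DEFAULT_EVIDENCE_ORDER := by
  unfold pvRank; split_ifs <;> simp_all [DEFAULT_EVIDENCE_ORDER]

-- B's rank dict looks up pvRank
theorem rank_getD (s : String) :
    (((PySem.List.enumerate DEFAULT_EVIDENCE_ORDER 0).foldl
        (fun d p => d.insert p.2 (p.1 : Int)) PySem.Dict.empty).getD s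
      (DEFAULT_EVIDENCE_ORDER.length : Int)) =
    (if s = "primary" then 0 else if s = "supporting" then 1 else if s = "conflicting" then 2 else 3) := by
  have h : ((PySem.List.enumerate DEFAULT_EVIDENCE_ORDER 0).foldl
        (fun d p => d.insert p.2 (p.1 : Int)) PySem.Dict.empty)
      = PySem.Dict.mk [("primary", (0:Int)), ("supporting", 1), ("conflicting", 2)] := by decide
  rw [h]
  by_cases h1 : s = "primary"
  · subst h1; decide
  by_cases h2 : s = "supporting"
  · subst h2; decide
  by_cases h3 : s = "conflicting"
  · subst h3; decide
  have b1 : (("primary" : String) == s) = false := by simp; exact fun e => h1 e.symm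
  have b2 : (("supporting" : String) == s) = false := by simp; exact fun e => h2 e.symm
  have b3 : (("conflicting" : String) == s) = false := by simp; exact fun e => h3 e.symm
  simp [PySem.Dict.getD_eq_get?_getD, PySem.Dict.get?_mk_cons, b1, b2, b3, h1, h2, h3,
    DEFAULT_EVIDENCE_ORDER, PySem.Dict.get?]

-- insertBy skips a prefix it is not before
theorem insertBy_skip {α : Type} (before : α → α → Bool) (x : α) (ys zs : List α)
    (h : ∀ y ∈ ys, before x y = false) :
    PySem.List.insertBy before x (ys ++ zs) = ys ++ PySem.List.insertBy before x zs := by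
  induction ys with
  | nil => simp
  | cons y ys ih =>
      have hy := h y (by simp)
      simp [PySem.List.insertBy, hy, ih (fun y hy => h y (by simp [hy]))]

-- insertBy goes to the front of a list it is before everywhere
theorem insertBy_front {α : Type} (before : α → α → Bool) (x : α) (zs : List α)
    (h : ∀ z ∈ zs, before x z = true) :
    PySem.List.insertBy before x zs = x :: zs := by
  cases zs with
  | nil => simp [PySem.List.insertBy]
  | cons z zs => simp [PySem.List.insertBy, h z (by simp)]

-- one insertion into a bucketed accumulator lands at the end of its bucket
theorem insert_bucket (x : List (String × String)) (b0 b1 b2 b3 : List (List (String × String)))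
    (h0 : ∀ y ∈ b0, pvRank y = 0) (h1 : ∀ y ∈ b1, pvRank y = 1)
    (h2 : ∀ y ∈ b2, pvRank y = 2) (h3 : ∀ y ∈ b3, pvRank y = 3) :
    PySem.List.insertBy (fun a b => decide (pvRank a < pvRank b)) x (b0 ++ b1 ++ b2 ++ b3) =
      (if pvRank x = 0 then (b0 ++ [x]) ++ b1 ++ b2 ++ b3
       else if pvRank x = 1 then b0 ++ (b1 ++ [x]) ++ b2 ++ b3
       else if pvRank x = 2 then b0 ++ b1 ++ (b2 ++ [x]) ++ b3
       else b0 ++ b1 ++ b2 ++ (b3 ++ [x])) := by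
  rcases pvRank_cases x with hx | hx | hx | hx
  · have hpre : ∀ y ∈ b0, (decide (pvRank x < pvRank y)) = false := by
      intro y hy; simp [hx, h0 y hy]
    have hsuf : ∀ z ∈ b1 ++ b2 ++ b3, (decide (pvRank x < pvRank z)) = true := by
      intro z hz
      simp only [List.mem_append] at hz
      rcases hz with (hz | hz) | hz
      · simp [hx, h1 z hz]
      · simp [hx, h2 z hz]
      · simp [hx, h3 z hz]
    rw [show b0 ++ b1 ++ b2 ++ b3 = b0 ++ (b1 ++ b2 ++ b3) by simp,
      insertBy_skip _ _ _ _ hpre, insertBy_front _ _ _ hsuf]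
    simp [hx]
  · have hpre : ∀ y ∈ b0 ++ b1, (decide (pvRank x < pvRank y)) = false := by
      intro y hy
      simp only [List.mem_append] at hy
      rcases hy with hy | hy
      · simp [hx, h0 y hy]
      · simp [hx, h1 y hy]
    have hsuf : ∀ z ∈ b2 ++ b3, (decide (pvRank x < pvRank z)) = true := by
      intro z hz
      simp only [List.mem_append] at hz
      rcases hz with hz | hz
      · simp [hx, h2 z hz]
      · simp [hx, h3 z hz]
    rw [show b0 ++ b1 ++ b2 ++ b3 = (b0 ++ b1) ++ (b2 ++ b3) by simp,
      insertBy_skip _ _ _ _ hpre, insertBy_front _ _ _ hsuf]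
    simp [hx]
  · have hpre : ∀ y ∈ b0 ++ b1 ++ b2, (decide (pvRank x < pvRank y)) = false := by
      intro y hy
      simp only [List.mem_append] at hy
      rcases hy with (hy | hy) | hy
      · simp [hx, h0 y hy]
      · simp [hx, h1 y hy]
      · simp [hx, h2 y hy]
    have hsuf : ∀ z ∈ b3, (decide (pvRank x < pvRank z)) = true := by
      intro z hz; simp [hx, h3 z hz]
    rw [insertBy_skip _ _ _ _ hpre, insertBy_front _ _ _ hsuf]
    simp [hx]
  · have hpre : ∀ y ∈ b0 ++ b1 ++ b2 ++ b3, (decide (pvRank x < pvRank y)) = false := by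
      intro y hy
      simp only [List.mem_append] at hy
      rcases hy with ((hy | hy) | hy) | hy
      · simp [hx, h0 y hy]
      · simp [hx, h1 y hy]
      · simp [hx, h2 y hy]
      · simp [hx, h3 y hy]
    rw [PySem.List.insertBy_of_forall_not_before _ _ _ hpre]
    simp [hx]

-- the insertion sort of xs into a bucketed accumulator appends the four filters
theorem foldl_insertBy_buckets (xs : List (List (String × String)))
    (b0 b1 b2 b3 : List (List (String × String)))
    (h0 : ∀ y ∈ b0, pvRank y = 0) (h1 : ∀ y ∈ b1, pvRank y = 1)
    (h2 : ∀ y ∈ b2, pvRank y = 2) (h3 : ∀ y ∈ b3, pvRank y = 3) :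
    xs.foldl (fun acc x => PySem.List.insertBy (fun a b => decide (pvRank a < pvRank b)) x acc)
        (b0 ++ b1 ++ b2 ++ b3) =
      (b0 ++ xs.filter (fun c => decide (pvRank c = 0))) ++
      (b1 ++ xs.filter (fun c => decide (pvRank c = 1))) ++
      (b2 ++ xs.filter (fun c => decide (pvRank c = 2))) ++
      (b3 ++ xs.filter (fun c => decide (pvRank c = 3))) := by
  induction xs generalizing b0 b1 b2 b3 with
  | nil => simp
  | cons x xs ih =>
      rw [List.foldl_cons, insert_bucket x b0 b1 b2 b3 h0 h1 h2 h3]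
      rcases pvRank_cases x with hx | hx | hx | hx
      · rw [if_pos hx,
          ih (b0 ++ [x]) b1 b2 b3
            (by intro y hy; rcases List.mem_append.mp hy with hy | hy
                · exact h0 y hy
                · simp at hy; subst hy; exact hx)
            h1 h2 h3]
        simp [hx]
      · rw [if_neg (by simp [hx]), if_pos hx,
          ih b0 (b1 ++ [x]) b2 b3 h0
            (by intro y hy; rcases List.mem_append.mp hy with hy | hy
                · exact h1 y hy
                · simp at hy; subst hy; exact hx)
            h2 h3]
        simp [hx]
      · rw [if_neg (by simp [hx]), if_neg (by simp [hx]), if_pos hx,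
          ih b0 b1 (b2 ++ [x]) b3 h0 h1
            (by intro y hy; rcases List.mem_append.mp hy with hy | hy
                · exact h2 y hy
                · simp at hy; subst hy; exact hx)
            h3]
        simp [hx]
      · rw [if_neg (by simp [hx]), if_neg (by simp [hx]), if_neg (by simp [hx]),
          ih b0 b1 b2 (b3 ++ [x]) h0 h1 h2
            (by intro y hy; rcases List.mem_append.mp hy with hy | hy
                · exact h3 y hy
                · simp at hy; subst hy; exact hx)]
        simp [hx]

-- A's initial grouped dict
def pvG0 : PySem.Dict String (List (List (String × String))) :=
  DEFAULT_EVIDENCE_ORDER.foldl (fun d role => d.insert role []) PySem.Dict.empty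

theorem g0_contains (r : String) : pvG0.contains r = decide (r ∈ DEFAULT_EVIDENCE_ORDER) := by
  by_cases h1 : r = "primary"
  · subst h1; decide
  by_cases h2 : r = "supporting"
  · subst h2; decide
  by_cases h3 : r = "conflicting"
  · subst h3; decide
  simp [pvG0, DEFAULT_EVIDENCE_ORDER, List.foldl, PySem.Dict.contains_insert,
    PySem.Dict.contains_empty, h1, h2, h3]

-- A's grouping loop: each role's bucket is a filter, extras are the rank-3 filter
theorem loopA (xs : List (List (String × String))) :
    ∀ (g : PySem.Dict String (List (List (String × String)))) (e : List (List (String × String))),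
    (∀ r, g.contains r = decide (r ∈ DEFAULT_EVIDENCE_ORDER)) →
    (xs.foldl
      (fun (st : PySem.Dict String (List (List (String × String))) × List (List (String × String))) context =>
        if st.1.contains (pvRole context) then
          (st.1.modify (pvRole context) [] (fun l => l ++ [context]), st.2)
        else (st.1, st.2 ++ [context]))
      (g, e)).1.getD "primary" [] = g.getD "primary" [] ++ xs.filter (fun c => decide (pvRole c = "primary")) ∧
    (xs.foldl
      (fun (st : PySem.Dict String (List (List (String × String))) × List (List (String × String))) context =>
        if st.1.contains (pvRole context) then
          (st.1.modify (pvRole context) [] (fun l => l ++ [context]), st.2)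
        else (st.1, st.2 ++ [context]))
      (g, e)).1.getD "supporting" [] = g.getD "supporting" [] ++ xs.filter (fun c => decide (pvRole c = "supporting")) ∧
    (xs.foldl
      (fun (st : PySem.Dict String (List (List (String × String))) × List (List (String × String))) context =>
        if st.1.contains (pvRole context) then
          (st.1.modify (pvRole context) [] (fun l => l ++ [context]), st.2)
        else (st.1, st.2 ++ [context]))
      (g, e)).1.getD "conflicting" [] = g.getD "conflicting" [] ++ xs.filter (fun c => decide (pvRole c = "conflicting")) ∧
    (xs.foldl
      (fun (st : PySem.Dict String (List (List (String × String))) × List (List (String × String))) context =>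
        if st.1.contains (pvRole context) then
          (st.1.modify (pvRole context) [] (fun l => l ++ [context]), st.2)
        else (st.1, st.2 ++ [context]))
      (g, e)).2 = e ++ xs.filter (fun c => decide (pvRank c = 3)) := by
  induction xs with
  | nil => intro g e _; simp
  | cons c xs ih =>
      intro g e hk
      by_cases hm : pvRole c ∈ DEFAULT_EVIDENCE_ORDER
      · have hcont : g.contains (pvRole c) = true := by rw [hk]; simp [hm]
        have hk' : ∀ r, (g.modify (pvRole c) [] (fun l => l ++ [c])).contains r
            = decide (r ∈ DEFAULT_EVIDENCE_ORDER) := by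
          intro r
          rw [PySem.Dict.contains_modify]
          by_cases hr : r = pvRole c
          · subst hr; simp [hm]
          · simp [beq_iff_eq, hr, hk r]
        have hr3 : pvRank c ≠ 3 := by simp [rank3_iff]; exact hm
        obtain ⟨ip, is, ic, ie⟩ := ih (g.modify (pvRole c) [] (fun l => l ++ [c])) e hk'
        simp only [List.foldl_cons, hcont, if_true, List.filter_cons]
        refine ⟨?_, ?_, ?_, ?_⟩
        · rw [ip, PySem.Dict.getD_modify]
          by_cases hpc : pvRole c = "primary"
          · simp [hpc]
          · simp [hpc]; intro h; exact absurd h.symm hpc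
        · rw [is, PySem.Dict.getD_modify]
          by_cases hpc : pvRole c = "supporting"
          · simp [hpc]
          · simp [hpc]; intro h; exact absurd h.symm hpc
        · rw [ic, PySem.Dict.getD_modify]
          by_cases hpc : pvRole c = "conflicting"
          · simp [hpc]
          · simp [hpc]; intro h; exact absurd h.symm hpc
        · rw [ie]; simp [hr3]
      · have hcont : g.contains (pvRole c) = false := by rw [hk]; simp [hm]
        have hr3 : pvRank c = 3 := by rw [rank3_iff]; exact hm
        obtain ⟨ip, is, ic, ie⟩ := ih g (e ++ [c]) hk
        simp only [List.foldl_cons, hcont, Bool.false_eq_true, if_false, List.filter_cons]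
        have n1 : pvRole c ≠ "primary" := by intro h; exact hm (by simp [h, DEFAULT_EVIDENCE_ORDER])
        have n2 : pvRole c ≠ "supporting" := by intro h; exact hm (by simp [h, DEFAULT_EVIDENCE_ORDER])
        have n3 : pvRole c ≠ "conflicting" := by intro h; exact hm (by simp [h, DEFAULT_EVIDENCE_ORDER])
        refine ⟨by rw [ip]; simp [n1], by rw [is]; simp [n2], by rw [ic]; simp [n3], ?_⟩
        rw [ie]; simp [hr3]

theorem order_contexts_eq (contexts : List (List (String × String))) :
    order_contexts_by_evidence_py contexts = order_contexts_by_evidence_py_alt contexts := by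
  obtain ⟨hp, hs, hc, he⟩ := loopA contexts pvG0 [] g0_contains
  rw [show pvG0 = ((PySem.Dict.empty.insert "primary" ([] : List (List (String × String)))).insert
      "supporting" []).insert "conflicting" [] from rfl] at hp hs hc he
  have hkey : (fun c => (((PySem.List.enumerate DEFAULT_EVIDENCE_ORDER 0).foldl
        (fun d p => d.insert p.2 (p.1 : Int)) PySem.Dict.empty).getD (pvRole c)
      (DEFAULT_EVIDENCE_ORDER.length : Int))) = pvRank := by
    funext c; rw [rank_getD]; rfl
  have hb := foldl_insertBy_buckets contexts [] [] [] []
    (by simp) (by simp) (by simp) (by simp)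
  simp only [List.nil_append] at hb
  have hgp : (((PySem.Dict.empty.insert "primary" ([] : List (List (String × String)))).insert
      "supporting" []).insert "conflicting" []).getD "primary" [] = [] := by decide
  have hgs : (((PySem.Dict.empty.insert "primary" ([] : List (List (String × String)))).insert
      "supporting" []).insert "conflicting" []).getD "supporting" [] = [] := by decide
  have hgc : (((PySem.Dict.empty.insert "primary" ([] : List (List (String × String)))).insert
      "supporting" []).insert "conflicting" []).getD "conflicting" [] = [] := by decide
  have f0 : contexts.filter (fun c => decide (pvRole c = "primary"))
      = contexts.filter (fun c => decide (pvRank c = 0)) :=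
    List.filter_congr (fun c _ => by simp [rank0_iff])
  have f1 : contexts.filter (fun c => decide (pvRole c = "supporting"))
      = contexts.filter (fun c => decide (pvRank c = 1)) :=
    List.filter_congr (fun c _ => by simp [rank1_iff])
  have f2 : contexts.filter (fun c => decide (pvRole c = "conflicting"))
      = contexts.filter (fun c => decide (pvRank c = 2)) :=
    List.filter_congr (fun c _ => by simp [rank2_iff])
  simp only [order_contexts_by_evidence_py, order_contexts_by_evidence_py_alt]
  rw [hkey, PySem.List.sorted_eq_foldl_insertBy]
  simp only [DEFAULT_EVIDENCE_ORDER, List.foldl_cons, List.foldl_nil, List.nil_append]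
  rw [hp, hs, hc, he, hgp, hgs, hgc, f0, f1, f2, hb]
  simp

-- ===== VERDICT (by name: the statement is the Claim_ definition above) =====
theorem order_contexts_by_evidence_py_spec : Claim_equal_order_contexts_by_evidence_py := by
  intro contexts _
  exact order_contexts_eq contexts
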